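-- pv_equiv track=rewrite | github.com/AltaArts/SourceTab--Prism-Plugin | Libs/MetaDataPopup.py | group_metadata
-- ===== SOURCE A (Python) =====
-- def group_metadata(metadata):
--     """
--     Groups metadata by the section tags (e.g., 'File', 'QuickTime', etc.)
--     Returns a dictionary with grouped metadata.
--     """
--     grouped = {}
--
--     for key, value in metadata.items():
--         # Extract the section (e.g., 'QuickTime', 'File') from the key
--         section = key.split(":")[0]  # Get the part before the colon
--         tag = key.split(":")[1] if len(key.split(":")) > 1 else key  # Get the part after the colon
--
--         if section not in grouped:
--             grouped[section] = {}
--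
--         grouped[section][tag] = value
--
--     return grouped
-- ===== SOURCE B (Python) =====
-- def _section(key):
--     return key.split(":")[0]
--
--
-- def _tag(key):
--     parts = key.split(":")
--     return parts[1] if len(parts) > 1 else key
--
--
-- def group_metadata(metadata):
--     """
--     Groups metadata by the section tags (e.g., 'File', 'QuickTime', etc.)
--     Two-phase: first collect the distinct sections in first-occurrence order,
--     then build each section's inner dict with one comprehension over the items.
--     """
--     sections = list(dict.fromkeys(_section(k) for k in metadata))
--     return {
--         s: {_tag(k): v for k, v in metadata.items() if _section(k) == s}
--         for s in sections
--     }
-- ===== Notes on version B (the rewrite author's own statement) =====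
-- stated objective: idiomatic
-- what changed: Replaces A's single incremental bucket-building pass (create-bucket-if-missing, then mutate) with a two-phase comprehension style: first dedup the section prefixes in first-occurrence order, then build each section's inner dict by one filtering comprehension over the items.
import Mathlib
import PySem

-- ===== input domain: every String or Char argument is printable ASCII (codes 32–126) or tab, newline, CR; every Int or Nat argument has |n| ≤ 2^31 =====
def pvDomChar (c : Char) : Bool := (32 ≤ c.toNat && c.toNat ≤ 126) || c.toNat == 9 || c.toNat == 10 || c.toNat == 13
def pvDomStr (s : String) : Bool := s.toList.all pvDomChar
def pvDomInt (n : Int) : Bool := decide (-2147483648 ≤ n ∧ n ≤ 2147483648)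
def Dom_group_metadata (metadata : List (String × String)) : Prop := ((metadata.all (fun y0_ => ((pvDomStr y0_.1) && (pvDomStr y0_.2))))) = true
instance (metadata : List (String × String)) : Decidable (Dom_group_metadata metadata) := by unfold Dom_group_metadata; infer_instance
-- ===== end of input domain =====

-- B is a two-phase comprehension rewrite of A (dedup the section prefixes, then one
-- filtering comprehension per section); equivalence of the return values is proved (idiomatic, not faster).

-- ===== PORT A =====
-- A: one incremental pass, creating a bucket for a fresh section then mutating it.
def group_metadata (metadata : List (String × String)) : List (String × List (String × String)) :=
  (metadata.foldl
    (fun (grouped : PySem.Dict String (PySem.Dict String String)) kv =>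
      let parts := (PySem.Str.split? kv.1 ":").getD []   -- key.split(":"); sep ":" ≠ "" so split? is some
      let sec := PySem.List.pyGetD parts 0 ""            -- key.split(":")[0]; split is never empty
      let tag := if parts.length > 1 then PySem.List.pyGetD parts 1 "" else kv.1
      let grouped := if grouped.contains sec then grouped else grouped.insert sec PySem.Dict.empty
      grouped.insert sec ((grouped.getD sec PySem.Dict.empty).insert tag kv.2))
    PySem.Dict.empty).items.map (fun p => (p.1, p.2.items))

-- ===== PORT B =====
def pvSection (key : String) : String :=
  PySem.List.pyGetD ((PySem.Str.split? key ":").getD []) 0 ""   -- key.split(":")[0]; split is never empty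

def pvTag (key : String) : String :=
  let parts := (PySem.Str.split? key ":").getD []
  if parts.length > 1 then PySem.List.pyGetD parts 1 "" else key

def group_metadata_alt (metadata : List (String × String)) : List (String × List (String × String)) :=
  let sections := PySem.List.dedup (metadata.map (fun kv => pvSection kv.1))
  sections.map (fun s =>
    (s, (metadata.foldl
          (fun (d : PySem.Dict String String) kv =>
            if pvSection kv.1 == s then d.insert (pvTag kv.1) kv.2 else d)
          PySem.Dict.empty).items))

-- ===== PRECONDITION & SPEC =====
def Spec_group_metadata (metadata : List (String × String)) (out : List (String × List (String × String))) : Prop := out = group_metadata_alt metadata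
instance (metadata : List (String × String)) (out : List (String × List (String × String))) : Decidable (Spec_group_metadata metadata out) := by unfold Spec_group_metadata; infer_instance

-- ===== CLAIM (what is proved, stated in full; the proofs are below) =====
def Claim_equal_group_metadata : Prop := ∀ (metadata : List (String × String)), Dom_group_metadata metadata → Spec_group_metadata metadata (group_metadata metadata)

-- ===== LEMMAS AND PROOFS =====

-- A's loop body, named for the proofs (identical to the lambda inside `group_metadata`)
def aStep (grouped : PySem.Dict String (PySem.Dict String String)) (kv : String × String) :
    PySem.Dict String (PySem.Dict String String) :=
  let parts := (PySem.Str.split? kv.1 ":").getD []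
  let sec := PySem.List.pyGetD parts 0 ""
  let tag := if parts.length > 1 then PySem.List.pyGetD parts 1 "" else kv.1
  let grouped := if grouped.contains sec then grouped else grouped.insert sec PySem.Dict.empty
  grouped.insert sec ((grouped.getD sec PySem.Dict.empty).insert tag kv.2)

-- B's inner dict for a section, named for the proofs
def bInner (s : String) (xs : List (String × String)) : PySem.Dict String String :=
  xs.foldl (fun d kv => if pvSection kv.1 == s then d.insert (pvTag kv.1) kv.2 else d) PySem.Dict.empty

lemma aStep_eq (g : PySem.Dict String (PySem.Dict String String)) (kv : String × String) :
    aStep g kv =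
      (if g.contains (pvSection kv.1) then g else g.insert (pvSection kv.1) PySem.Dict.empty).insert
        (pvSection kv.1)
        (((if g.contains (pvSection kv.1) then g else g.insert (pvSection kv.1) PySem.Dict.empty).getD
            (pvSection kv.1) PySem.Dict.empty).insert (pvTag kv.1) kv.2) := rfl

lemma bInner_append (s : String) (xs : List (String × String)) (x : String × String) :
    bInner s (xs ++ [x]) =
      if pvSection x.1 == s then (bInner s xs).insert (pvTag x.1) x.2 else bInner s xs := by
  simp [bInner, List.foldl_append]

lemma bInner_of_not_mem (s : String) (xs : List (String × String))
    (h : s ∉ xs.map (fun kv => pvSection kv.1)) : bInner s xs = PySem.Dict.empty := by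
  have key : ∀ (t : List (String × String)) (d : PySem.Dict String String),
      (∀ kv ∈ t, pvSection kv.1 ≠ s) →
      t.foldl (fun d kv => if pvSection kv.1 == s then d.insert (pvTag kv.1) kv.2 else d) d = d := by
    intro t
    induction t with
    | nil => intro d _; rfl
    | cons a t ih =>
      intro d hh
      have h1 : pvSection a.1 ≠ s := hh a (List.mem_cons_self ..)
      rw [List.foldl_cons, if_neg (by simpa using h1)]
      exact ih d (fun kv hk => hh kv (List.mem_cons_of_mem _ hk))
  exact key xs PySem.Dict.empty (fun kv hk hs => h (hs ▸ List.mem_map_of_mem hk))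

lemma dedup_append_singleton (l : List String) (a : String) :
    PySem.List.dedup (l ++ [a]) =
      if a ∈ l then PySem.List.dedup l else PySem.List.dedup l ++ [a] := by
  simp only [PySem.List.dedup_eq_ofList, PySem.Set.ofList_eq_foldl, List.foldl_append,
    List.foldl_cons, List.foldl_nil]
  rw [← PySem.Set.ofList_eq_foldl]
  by_cases h : a ∈ l
  · simp [PySem.Set.add, PySem.Set.contains, PySem.Set.mem_ofList, h]
  · simp [PySem.Set.add, PySem.Set.contains, PySem.Set.mem_ofList, h]

lemma fold_items (xs : List (String × String)) :
    (xs.foldl aStep PySem.Dict.empty).items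
      = (PySem.List.dedup (xs.map (fun kv => pvSection kv.1))).map (fun s => (s, bInner s xs)) := by
  induction xs using List.reverseRecOn with
  | nil => rfl
  | append_singleton xs x ih =>
    rw [List.foldl_append, List.foldl_cons, List.foldl_nil]
    have hkeys : (xs.foldl aStep PySem.Dict.empty).keys
        = PySem.List.dedup (xs.map (fun kv => pvSection kv.1)) := by
      show ((xs.foldl aStep PySem.Dict.empty).items).map Prod.fst = _
      rw [ih, List.map_map]; exact List.map_id _
    have hnodup : (xs.foldl aStep PySem.Dict.empty).keys.Nodup := by
      rw [hkeys]; exact PySem.List.nodup_dedup _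
    have hsecs : (xs ++ [x]).map (fun kv => pvSection kv.1)
        = xs.map (fun kv => pvSection kv.1) ++ [pvSection x.1] := by simp
    rw [aStep_eq, hsecs, dedup_append_singleton]
    by_cases hmem : pvSection x.1 ∈ xs.map (fun kv => pvSection kv.1)
    · -- existing section: overwrite in place
      have hcont : (xs.foldl aStep PySem.Dict.empty).contains (pvSection x.1) = true := by
        rw [PySem.Dict.contains_iff_mem_keys, hkeys, PySem.List.mem_dedup]; exact hmem
      have hitem : (pvSection x.1, bInner (pvSection x.1) xs) ∈ (xs.foldl aStep PySem.Dict.empty).items := by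
        rw [ih]
        exact List.mem_map_of_mem ((PySem.List.mem_dedup _ _).mpr hmem)
      rw [if_pos hcont, if_pos hmem, PySem.Dict.getD_of_mem_items _ hitem hnodup PySem.Dict.empty,
        PySem.Dict.items_insert_of_contains _ _ hcont, ih, List.map_map]
      apply List.map_congr_left
      intro s _
      by_cases hss : s = pvSection x.1
      · subst hss; simp [bInner_append]
      · simp [bInner_append, hss, Ne.symm hss]
    · -- fresh section: a new bucket is appended
      have hcont : (xs.foldl aStep PySem.Dict.empty).contains (pvSection x.1) = false := by
        rw [Bool.eq_false_iff]
        intro hc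
        exact hmem ((PySem.List.mem_dedup _ _).mp (hkeys ▸ (PySem.Dict.contains_iff_mem_keys _ _).mp hc))
      rw [if_neg (by simp [hcont]), if_neg hmem, PySem.Dict.getD_insert_self,
        PySem.Dict.insert_insert_self, PySem.Dict.items_insert_of_not_contains _ _ hcont,
        ih, List.map_append]
      congr 1
      · apply List.map_congr_left
        intro s hs
        have hne : pvSection x.1 ≠ s := by
          intro he; exact hmem (he ▸ (PySem.List.mem_dedup _ _).mp hs)
        rw [bInner_append, if_neg (by simpa using hne)]
      · simp only [List.map_cons, List.map_nil]
        rw [bInner_append, if_pos (by simp), bInner_of_not_mem _ _ hmem]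

-- ===== VERDICT (by name: the statement is the Claim_ definition above) =====
theorem group_metadata_spec : Claim_equal_group_metadata := by
  intro metadata _
  show group_metadata metadata = group_metadata_alt metadata
  have hA : group_metadata metadata
      = ((metadata.foldl aStep PySem.Dict.empty).items).map (fun p => (p.1, p.2.items)) := rfl
  rw [hA, fold_items, List.map_map]
  rfl
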